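-- pv_equiv track=rewrite | github.com/agnel18/anki-fluent-forever-language-card-generator | streamlit_app/language_analyzers/family_base_analyzers/indo_european_analyzer.py | _map_grammatical_role_to_category
-- ===== SOURCE A (Python) =====
-- def _map_grammatical_role_to_category(grammatical_role: str) -> str:
--     """Map grammatical role descriptions to color category names"""
--     role_lower = grammatical_role.lower()
--
--     # Map various grammatical roles to color categories
--     if any(keyword in role_lower for keyword in ['pronoun', 'personal', 'demonstrative', 'possessive']):
--         return 'pronoun'
--     elif any(keyword in role_lower for keyword in ['verb', 'action', 'state', 'linking', 'auxiliary', 'modal']):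
--         return 'verb'
--     elif any(keyword in role_lower for keyword in ['noun', 'object', 'subject']):
--         return 'noun'
--     elif any(keyword in role_lower for keyword in ['adjective', 'description', 'quality']):
--         return 'adjective'
--     elif any(keyword in role_lower for keyword in ['adverb', 'manner', 'time', 'place', 'degree']):
--         return 'adverb'
--     elif any(keyword in role_lower for keyword in ['preposition', 'postposition', 'case', 'marker']):
--         return 'postposition'
--     else:
--         return 'other'
-- ===== SOURCE B (Python) =====
-- # B: flat keyword->rank table; the answer is the category of the minimum rank
-- # among all matching keywords (min with a default), instead of an if/elif cascade.
-- _KEYWORD_RANK = {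
--     'pronoun': 0, 'personal': 0, 'demonstrative': 0, 'possessive': 0,
--     'verb': 1, 'action': 1, 'state': 1, 'linking': 1, 'auxiliary': 1, 'modal': 1,
--     'noun': 2, 'object': 2, 'subject': 2,
--     'adjective': 3, 'description': 3, 'quality': 3,
--     'adverb': 4, 'manner': 4, 'time': 4, 'place': 4, 'degree': 4,
--     'preposition': 5, 'postposition': 5, 'case': 5, 'marker': 5,
-- }
-- _CATEGORIES = ('pronoun', 'verb', 'noun', 'adjective', 'adverb', 'postposition', 'other')
--
--
-- def _map_grammatical_role_to_category(grammatical_role: str) -> str: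
--     role_lower = grammatical_role.lower()
--     best = min((rank for keyword, rank in _KEYWORD_RANK.items()
--                 if keyword in role_lower), default=len(_CATEGORIES) - 1)
--     return _CATEGORIES[best]
-- ===== Notes on version B (the rewrite author's own statement) =====
-- stated objective: alternative
-- what changed: Instead of an if/elif cascade of per-category any() substring checks with early return, B flattens all keywords into one keyword->rank map, computes the minimum rank over all matching keywords in a single exhaustive pass (min with a default), and indexes a category tuple by that rank.
import Mathlib
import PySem

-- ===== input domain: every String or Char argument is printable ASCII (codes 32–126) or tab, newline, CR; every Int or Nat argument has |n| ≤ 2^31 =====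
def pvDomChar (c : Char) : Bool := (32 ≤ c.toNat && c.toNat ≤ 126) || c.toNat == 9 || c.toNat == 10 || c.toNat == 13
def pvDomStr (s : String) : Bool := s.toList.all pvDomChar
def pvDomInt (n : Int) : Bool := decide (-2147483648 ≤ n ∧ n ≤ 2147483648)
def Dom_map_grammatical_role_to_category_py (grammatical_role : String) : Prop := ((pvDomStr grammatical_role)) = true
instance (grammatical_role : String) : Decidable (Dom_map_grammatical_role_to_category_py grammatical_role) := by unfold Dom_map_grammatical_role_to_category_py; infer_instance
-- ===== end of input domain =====

-- B replaces A's if/elif cascade of per-category any() checks by a single exhaustive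
-- minimum over a flat keyword→rank table, then indexes the category list by that
-- minimum rank (objective: alternative decomposition of the same cost).

-- ===== PORT A =====
-- A: lowercase once, then an if/elif cascade, each branch an any(keyword in role_lower …)
def map_grammatical_role_to_category_py (grammatical_role : String) : String :=
  let role_lower := PySem.Str.lower grammatical_role
  if (["pronoun", "personal", "demonstrative", "possessive"].any
      (fun keyword => PySem.Str.isIn keyword role_lower)) then "pronoun"
  else if (["verb", "action", "state", "linking", "auxiliary", "modal"].any
      (fun keyword => PySem.Str.isIn keyword role_lower)) then "verb"
  else if (["noun", "object", "subject"].any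
      (fun keyword => PySem.Str.isIn keyword role_lower)) then "noun"
  else if (["adjective", "description", "quality"].any
      (fun keyword => PySem.Str.isIn keyword role_lower)) then "adjective"
  else if (["adverb", "manner", "time", "place", "degree"].any
      (fun keyword => PySem.Str.isIn keyword role_lower)) then "adverb"
  else if (["preposition", "postposition", "case", "marker"].any
      (fun keyword => PySem.Str.isIn keyword role_lower)) then "postposition"
  else "other"

-- ===== PORT B =====
-- B-side helper: the flat keyword → rank dict, in insertion order
def pvKeywordRank : List (String × Nat) :=
  [("pronoun", 0), ("personal", 0), ("demonstrative", 0), ("possessive", 0),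
   ("verb", 1), ("action", 1), ("state", 1), ("linking", 1), ("auxiliary", 1), ("modal", 1),
   ("noun", 2), ("object", 2), ("subject", 2),
   ("adjective", 3), ("description", 3), ("quality", 3),
   ("adverb", 4), ("manner", 4), ("time", 4), ("place", 4), ("degree", 4),
   ("preposition", 5), ("postposition", 5), ("case", 5), ("marker", 5)]

def pvCategories : List String :=
  ["pronoun", "verb", "noun", "adjective", "adverb", "postposition", "other"]

-- B: best = min(rank for keyword,rank in table if keyword in role_lower, default=len-1);
-- the min over a stream with a default is the fold below. best ≤ 6 always, so the
-- List.getD default is unreachable (Python's tuple index never goes out of range here).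
def map_grammatical_role_to_category_py_alt (grammatical_role : String) : String :=
  let role_lower := PySem.Str.lower grammatical_role
  let best := pvKeywordRank.foldl
    (fun best p => if PySem.Str.isIn p.1 role_lower then min best p.2 else best)
    (pvCategories.length - 1)
  pvCategories.getD best "other"

-- ===== PRECONDITION & SPEC =====
def Spec_map_grammatical_role_to_category_py (grammatical_role : String) (out : String) : Prop := out = map_grammatical_role_to_category_py_alt grammatical_role
instance (grammatical_role : String) (out : String) : Decidable (Spec_map_grammatical_role_to_category_py grammatical_role out) := by unfold Spec_map_grammatical_role_to_category_py; infer_instance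

-- ===== CLAIM (what is proved, stated in full; the proofs are below) =====
def Claim_equal_map_grammatical_role_to_category_py : Prop := ∀ (grammatical_role : String), Dom_map_grammatical_role_to_category_py grammatical_role → Spec_map_grammatical_role_to_category_py grammatical_role (map_grammatical_role_to_category_py grammatical_role)

-- ===== LEMMAS AND PROOFS =====

-- the fold step, abstracted over the match predicate c
def pvStep (c : String → Bool) : Nat → String × Nat → Nat :=
  fun b p => if c p.1 then min b p.2 else b

theorem pvFold_skip (c : String → Bool) (l : List (String × Nat)) (a : Nat)
    (h : ∀ p ∈ l, c p.1 = false) : l.foldl (pvStep c) a = a := by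
  induction l with
  | nil => rfl
  | cons q t ih =>
      have hq : pvStep c a q = a := by simp [pvStep, h q (by simp)]
      rw [List.foldl_cons, hq]
      exact ih fun p hp => h p (by simp [hp])

theorem pvFold_floor (c : String → Bool) (l : List (String × Nat)) (a : Nat)
    (h : ∀ p ∈ l, a ≤ p.2) : l.foldl (pvStep c) a = a := by
  induction l with
  | nil => rfl
  | cons q t ih =>
      have hq : pvStep c a q = a := by
        simp only [pvStep]
        split
        · exact Nat.min_eq_left (h q (by simp))
        · rfl
      rw [List.foldl_cons, hq]
      exact ih fun p hp => h p (by simp [hp])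

theorem pvFold_group (c : String → Bool) (l : List (String × Nat)) (i : Nat)
    (hall : ∀ p ∈ l, p.2 = i) (hany : l.any (fun p => c p.1) = true) :
    ∀ a : Nat, i ≤ a → l.foldl (pvStep c) a = i := by
  induction l with
  | nil => simp at hany
  | cons q t ih =>
      intro a hle
      by_cases hq : c q.1 = true
      · have hstep : pvStep c a q = i := by
          simp [pvStep, hq, hall q (by simp), Nat.min_eq_right hle]
        rw [List.foldl_cons, hstep]
        exact pvFold_floor c t i fun p hp => le_of_eq (hall p (by simp [hp])).symm
      · have hstep : pvStep c a q = a := by simp [pvStep, hq]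
        rw [List.foldl_cons, hstep]
        have hany' : t.any (fun p => c p.1) = true := by
          rcases List.any_eq_true.mp hany with ⟨p, hp, hc⟩
          rcases List.mem_cons.mp hp with h | h
          · exact absurd (h ▸ hc) hq
          · exact List.any_eq_true.mpr ⟨p, h, hc⟩
        exact ih (fun p hp => hall p (by simp [hp])) hany' a hle

-- characterization of B's fold as A's cascade, for any match predicate c
theorem pvBest_eq (c : String → Bool) :
    pvKeywordRank.foldl (pvStep c) 6 =
      (if (["pronoun", "personal", "demonstrative", "possessive"].any c) then 0
       else if (["verb", "action", "state", "linking", "auxiliary", "modal"].any c) then 1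
       else if (["noun", "object", "subject"].any c) then 2
       else if (["adjective", "description", "quality"].any c) then 3
       else if (["adverb", "manner", "time", "place", "degree"].any c) then 4
       else if (["preposition", "postposition", "case", "marker"].any c) then 5
       else 6) := by
  have hsplit : pvKeywordRank =
      ([("pronoun",0),("personal",0),("demonstrative",0),("possessive",0)] : List (String × Nat)) ++
      [("verb",1),("action",1),("state",1),("linking",1),("auxiliary",1),("modal",1)] ++
      [("noun",2),("object",2),("subject",2)] ++
      [("adjective",3),("description",3),("quality",3)] ++
      [("adverb",4),("manner",4),("time",4),("place",4),("degree",4)] ++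
      [("preposition",5),("postposition",5),("case",5),("marker",5)] := rfl
  rw [hsplit]
  simp only [List.foldl_append]
  by_cases h0 : (["pronoun", "personal", "demonstrative", "possessive"].any c) = true
  · rw [if_pos h0,
      pvFold_group c _ 0 (by decide) (by simpa using h0) 6 (by omega),
      pvFold_floor c _ 0 (by decide), pvFold_floor c _ 0 (by decide),
      pvFold_floor c _ 0 (by decide), pvFold_floor c _ 0 (by decide),
      pvFold_floor c _ 0 (by decide)]
  rw [if_neg h0, pvFold_skip c _ 6 (by intro p hp; fin_cases hp <;> simp_all)]
  by_cases h1 : (["verb", "action", "state", "linking", "auxiliary", "modal"].any c) = true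
  · rw [if_pos h1,
      pvFold_group c _ 1 (by decide) (by simpa using h1) 6 (by omega),
      pvFold_floor c _ 1 (by decide), pvFold_floor c _ 1 (by decide),
      pvFold_floor c _ 1 (by decide), pvFold_floor c _ 1 (by decide)]
  rw [if_neg h1, pvFold_skip c _ 6 (by intro p hp; fin_cases hp <;> simp_all)]
  by_cases h2 : (["noun", "object", "subject"].any c) = true
  · rw [if_pos h2,
      pvFold_group c _ 2 (by decide) (by simpa using h2) 6 (by omega),
      pvFold_floor c _ 2 (by decide), pvFold_floor c _ 2 (by decide),
      pvFold_floor c _ 2 (by decide)]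
  rw [if_neg h2, pvFold_skip c _ 6 (by intro p hp; fin_cases hp <;> simp_all)]
  by_cases h3 : (["adjective", "description", "quality"].any c) = true
  · rw [if_pos h3,
      pvFold_group c _ 3 (by decide) (by simpa using h3) 6 (by omega),
      pvFold_floor c _ 3 (by decide), pvFold_floor c _ 3 (by decide)]
  rw [if_neg h3, pvFold_skip c _ 6 (by intro p hp; fin_cases hp <;> simp_all)]
  by_cases h4 : (["adverb", "manner", "time", "place", "degree"].any c) = true
  · rw [if_pos h4,
      pvFold_group c _ 4 (by decide) (by simpa using h4) 6 (by omega),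
      pvFold_floor c _ 4 (by decide)]
  rw [if_neg h4, pvFold_skip c _ 6 (by intro p hp; fin_cases hp <;> simp_all)]
  by_cases h5 : (["preposition", "postposition", "case", "marker"].any c) = true
  · rw [if_pos h5, pvFold_group c _ 5 (by decide) (by simpa using h5) 6 (by omega)]
  rw [if_neg h5, pvFold_skip c _ 6 (by intro p hp; fin_cases hp <;> simp_all)]

-- ===== VERDICT (by name: the statement is the Claim_ definition above) =====
theorem map_grammatical_role_to_category_py_spec : Claim_equal_map_grammatical_role_to_category_py := by
  intro s _
  unfold Spec_map_grammatical_role_to_category_py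
  unfold map_grammatical_role_to_category_py map_grammatical_role_to_category_py_alt
  have h := pvBest_eq (fun keyword => PySem.Str.isIn keyword (PySem.Str.lower s))
  simp only [pvCategories, List.length_cons, List.length_nil]
  rw [show (0 + 1 + 1 + 1 + 1 + 1 + 1 + 1 - 1 : Nat) = 6 from rfl]
  rw [show ((fun best p => if PySem.Str.isIn p.1 (PySem.Str.lower s) = true then min best p.2 else best) : Nat → String × Nat → Nat) = pvStep (fun keyword => PySem.Str.isIn keyword (PySem.Str.lower s)) from rfl]
  rw [h]
  split_ifs <;> rfl
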